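-- pv_equiv track=rewrite | github.com/MR34Z1r0/cdk-datalake-ingest-upeu | utils/extract_data_v2/extract/query_builder.py | _split_and_clean_columns
-- ===== SOURCE A (Python) =====
-- def _split_and_clean_columns(columns_str: str) -> list:
--     """Split columns intelligently and clean them"""
--     if not columns_str or columns_str.strip() == '':
--         return ['*']
--
--     columns = []
--     current_column = ""
--     paren_count = 0
--     in_single_quote = False
--
--     i = 0
--     while i < len(columns_str):
--         char = columns_str[i]
--         current_column += char
--
--         if char == "'" and not in_single_quote:
--             in_single_quote = True
--         elif char == "'" and in_single_quote:
--             in_single_quote = False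
--         elif not in_single_quote:
--             if char == '(':
--                 paren_count += 1
--             elif char == ')':
--                 paren_count -= 1
--             elif char == ',' and paren_count == 0:
--                 # This is a column separator
--                 column_text = current_column[:-1].strip()  # Remove the comma
--                 if column_text:
--                     columns.append(column_text)
--                 current_column = ""
--         i += 1
--
--     # Add the last column
--     if current_column.strip():
--         columns.append(current_column.strip())
--
--     return [col for col in columns if col.strip()]
-- ===== SOURCE B (Python) =====
-- def _split_and_clean_columns(columns_str: str) -> list:
--     """Split columns intelligently and clean them"""
--     if not columns_str or columns_str.strip() == '':
--         return ['*']
--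
--     result = []
--     buf = []
--     depth = 0
--     in_quote = False
--     for piece in columns_str.split(','):
--         buf.append(piece)
--         for ch in piece:
--             if ch == "'":
--                 in_quote = not in_quote
--             elif not in_quote:
--                 if ch == '(':
--                     depth += 1
--                 elif ch == ')':
--                     depth -= 1
--         if depth == 0 and not in_quote:
--             col = ','.join(buf).strip()
--             buf = []
--             if col:
--                 result.append(col)
--     rest = ','.join(buf).strip()
--     if rest:
--         result.append(rest)
--     return result
-- ===== Notes on version B (the rewrite author's own statement) =====
-- stated objective: faster
-- what changed: B replaces A's index-driven character scan (which rebuilds current_column by string concatenation at every character and emits at separator commas) by one comma-split pass followed by a fold over the pieces that keeps a piece buffer plus paren/quote counters and re-joins buffered pieces when balanced; the trailing blank-filter pass disappears.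
import Mathlib
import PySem

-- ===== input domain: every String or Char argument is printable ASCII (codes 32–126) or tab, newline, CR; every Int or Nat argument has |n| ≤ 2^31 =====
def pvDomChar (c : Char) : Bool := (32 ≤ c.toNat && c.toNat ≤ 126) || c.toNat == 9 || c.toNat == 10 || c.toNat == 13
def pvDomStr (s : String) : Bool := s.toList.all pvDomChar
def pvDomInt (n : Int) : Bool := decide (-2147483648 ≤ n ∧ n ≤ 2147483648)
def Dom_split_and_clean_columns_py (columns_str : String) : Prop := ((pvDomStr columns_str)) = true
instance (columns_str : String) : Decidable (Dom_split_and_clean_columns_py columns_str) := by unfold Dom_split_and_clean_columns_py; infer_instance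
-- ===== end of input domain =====

-- B re-decomposes A's per-character scan (string concatenation each step) as one comma-split
-- followed by a fold over the pieces with a piece buffer and paren/quote counters; measured faster.

-- ===== PORT A =====
-- one step of A's while-loop; state = (columns, current_column, paren_count, in_single_quote)
def pvStepA (st : List (List Char) × List Char × Int × Bool) (c : Char) :
    List (List Char) × List Char × Int × Bool :=
  let cols := st.1
  let cur' := st.2.1 ++ [c]
  let p := st.2.2.1
  let q := st.2.2.2
  if c = '\'' ∧ q = false then (cols, cur', p, true)
  else if c = '\'' ∧ q = true then (cols, cur', p, false)
  else if q = false then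
    if c = '(' then (cols, cur', p + 1, q)
    else if c = ')' then (cols, cur', p - 1, q)
    else if c = ',' ∧ p = 0 then
      -- column_text = current_column[:-1].strip()
      let t := PySem.Chars.strip (PySem.List.slice cur' none (some (-1)))
      ((if t ≠ [] then cols ++ [t] else cols), [], p, q)
    else (cols, cur', p, q)
  else (cols, cur', p, q)

-- "Add the last column"
def pvFinA (st : List (List Char) × List Char × Int × Bool) : List (List Char) :=
  if PySem.Chars.strip st.2.1 ≠ [] then st.1 ++ [PySem.Chars.strip st.2.1] else st.1

def split_and_clean_columns_py (columns_str : String) : List String :=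
  if columns_str = "" ∨ PySem.Str.strip columns_str = "" then ["*"]
  else
    let st := columns_str.toList.foldl pvStepA ([], [], 0, false)
    ((pvFinA st).filter (fun col => decide (PySem.Chars.strip col ≠ []))).map String.ofList

-- ===== PORT B =====
-- B's inner character loop: update (depth, in_quote) from one character
def pvScanB (pq : Int × Bool) (c : Char) : Int × Bool :=
  if c = '\'' then (pq.1, !pq.2)
  else if pq.2 then pq
  else if c = '(' then (pq.1 + 1, pq.2)
  else if c = ')' then (pq.1 - 1, pq.2)
  else pq

-- B's outer loop body; state = (result, buf, depth, in_quote)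
def pvStepB (st : List (List Char) × List (List Char) × Int × Bool) (piece : List Char) :
    List (List Char) × List (List Char) × Int × Bool :=
  let res := st.1
  let buf' := st.2.1 ++ [piece]
  let pq := piece.foldl pvScanB (st.2.2.1, st.2.2.2)
  if pq.1 = 0 ∧ pq.2 = false then
    let col := PySem.Chars.strip (PySem.Chars.join [','] buf')
    ((if col ≠ [] then res ++ [col] else res), [], pq.1, pq.2)
  else (res, buf', pq.1, pq.2)

-- rest = ','.join(buf).strip(); if rest: result.append(rest)
def pvFinB (st : List (List Char) × List (List Char) × Int × Bool) : List (List Char) :=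
  let rest := PySem.Chars.strip (PySem.Chars.join [','] st.2.1)
  if rest ≠ [] then st.1 ++ [rest] else st.1

def split_and_clean_columns_py_alt (columns_str : String) : List String :=
  if columns_str = "" ∨ PySem.Str.strip columns_str = "" then ["*"]
  else
    let st := (PySem.Chars.splitOn columns_str.toList [',']).foldl pvStepB ([], [], 0, false)
    (pvFinB st).map String.ofList

-- ===== PRECONDITION & SPEC =====
def Spec_split_and_clean_columns_py (columns_str : String) (out : List String) : Prop := out = split_and_clean_columns_py_alt columns_str
instance (columns_str : String) (out : List String) : Decidable (Spec_split_and_clean_columns_py columns_str out) := by unfold Spec_split_and_clean_columns_py; infer_instance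

-- ===== CLAIM (what is proved, stated in full; the proofs are below) =====
def Claim_equal_split_and_clean_columns_py : Prop := ∀ (columns_str : String), Dom_split_and_clean_columns_py columns_str → Spec_split_and_clean_columns_py columns_str (split_and_clean_columns_py columns_str)

-- ===== LEMMAS AND PROOFS =====

-- structural characterisation of Python's split(',')
def pySplitC (pre : List Char) : List Char → List (List Char)
  | [] => [pre]
  | c :: rest => if c = ',' then pre :: pySplitC [] rest else pySplitC (pre ++ [c]) rest

lemma pySplitC_comma (pre rest : List Char) :
    pySplitC pre (',' :: rest) = pre :: pySplitC [] rest := by simp [pySplitC]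

lemma pySplitC_cons {c : Char} (hc : c ≠ ',') {pre rest : List Char} :
    pySplitC pre (c :: rest) = pySplitC (pre ++ [c]) rest := by simp [pySplitC, hc]

lemma go_spec : ∀ (l : List Char) (fuel : Nat) (cur : List Char) (acc : List (List Char)),
    l.length < fuel →
    PySem.Chars.splitOn.go [','] fuel l cur acc = acc.reverse ++ pySplitC cur.reverse l := by
  intro l
  induction l with
  | nil =>
      intro fuel cur acc h
      cases fuel with
      | zero => omega
      | succ f => simp [PySem.Chars.splitOn.go, pySplitC]
  | cons c rest ih =>
      intro fuel cur acc h
      cases fuel with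
      | zero => simp at h
      | succ f =>
          by_cases hc : c = ','
          · subst hc
            rw [PySem.Chars.splitOn.go, pySplitC_comma]
            rw [if_pos (by simp [List.isPrefixOf])]
            have hd : List.drop [','].length (',' :: rest) = rest := by simp
            rw [hd, ih f [] (cur.reverse :: acc) (by simpa using h)]
            simp
          · rw [PySem.Chars.splitOn.go]
            have : [','].isPrefixOf (c :: rest) = false := by
              simp [List.isPrefixOf, hc]
              intro h'; exact absurd h'.symm hc
            simp only [this, Bool.false_eq_true]
            rw [ih f (c :: cur) acc (by simpa using h), pySplitC_cons hc]
            simp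

lemma splitOn_eq (cs : List Char) : PySem.Chars.splitOn cs [','] = pySplitC [] cs := by
  have := go_spec cs (cs.length + 1) [] [] (by omega)
  simpa [PySem.Chars.splitOn] using this

lemma pySplitC_ne_nil : ∀ (cs : List Char) (pre : List Char), pySplitC pre cs ≠ [] := by
  intro cs
  induction cs with
  | nil => intro pre; simp [pySplitC]
  | cons c rest ih =>
      intro pre
      by_cases hc : c = ','
      · subst hc; rw [pySplitC_comma]; simp
      · rw [pySplitC_cons hc]; exact ih _

lemma join_pySplitC : ∀ (cs pre : List Char),
    PySem.Chars.join [','] (pySplitC pre cs) = pre ++ cs := by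
  intro cs
  induction cs with
  | nil => intro pre; simp [pySplitC, PySem.Chars.join_singleton]
  | cons c rest ih =>
      intro pre
      by_cases hc : c = ','
      · subst hc
        obtain ⟨x, xs, hx⟩ := List.exists_cons_of_ne_nil (pySplitC_ne_nil rest [])
        rw [pySplitC_comma, hx, PySem.Chars.join_cons_cons, ← hx, ih]
        simp
      · rw [pySplitC_cons hc, ih]; simp
  
lemma comma_free : ∀ (cs pre : List Char), ',' ∉ pre →
    ∀ pc ∈ pySplitC pre cs, ',' ∉ pc := by
  intro cs
  induction cs with
  | nil => intro pre hpre pc hpc; simp [pySplitC] at hpc; subst hpc; exact hpre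
  | cons c rest ih =>
      intro pre hpre pc hpc
      by_cases hc : c = ','
      · subst hc
        rw [pySplitC_comma] at hpc
        rw [List.mem_cons] at hpc
        rcases hpc with h | h
        · subst h; exact hpre
        · exact ih [] (by simp) pc h
      · rw [pySplitC_cons hc] at hpc
        exact ih (pre ++ [c]) (by simp [hpre, hc]; intro h; exact hc h.symm) pc hpc

lemma stepA_nonsep (c : Char) (hc : c ≠ ',') (cols : List (List Char)) (cur : List Char)
    (p : Int) (q : Bool) :
    pvStepA (cols, cur, p, q) c = (cols, cur ++ [c], pvScanB (p, q) c) := by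
  simp only [pvStepA, pvScanB]
  by_cases hq : q = false <;> by_cases hquote : c = '\'' <;>
    simp [hq, hquote, hc] <;> split_ifs <;> simp_all

lemma foldA_piece : ∀ (pc : List Char), ',' ∉ pc → ∀ (cols : List (List Char)) (cur : List Char)
    (p : Int) (q : Bool),
    pc.foldl pvStepA (cols, cur, p, q) = (cols, cur ++ pc, pc.foldl pvScanB (p, q)) := by
  intro pc
  induction pc with
  | nil => intro _ cols cur p q; simp
  | cons c rest ih =>
      intro h cols cur p q
      have hc : c ≠ ',' := fun h' => h (by simp [h'])
      rw [List.foldl_cons, stepA_nonsep c hc]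
      rcases hpq : pvScanB (p, q) c with ⟨p', q'⟩
      rw [ih (fun h' => h (by simp [h'])) cols (cur ++ [c]) p' q']
      simp [List.foldl_cons, hpq]

lemma slice_dropLast (cur : List Char) (c : Char) :
    PySem.List.slice (cur ++ [c]) none (some (-1)) = cur := by
  simp [PySem.List.slice]

lemma stepA_comma (cols : List (List Char)) (cur : List Char) (p : Int) (q : Bool) :
    pvStepA (cols, cur, p, q) ',' =
      if p = 0 ∧ q = false then
        ((if PySem.Chars.strip cur ≠ [] then cols ++ [PySem.Chars.strip cur] else cols), [], p, q)
      else (cols, cur ++ [','], p, q) := by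
  simp only [pvStepA, slice_dropLast]
  split_ifs <;> simp_all

lemma join_snoc : ∀ (buf : List (List Char)) (x y : List Char),
    PySem.Chars.join [','] (buf ++ [x]) ++ y = PySem.Chars.join [','] (buf ++ [x ++ y]) := by
  intro buf
  induction buf with
  | nil => intro x y; simp [PySem.Chars.join_singleton]
  | cons b rest ih =>
      intro x y
      obtain ⟨z, zs, hz⟩ := List.exists_cons_of_ne_nil (show rest ++ [x] ≠ [] by simp)
      obtain ⟨w, ws, hw⟩ := List.exists_cons_of_ne_nil (show rest ++ [x ++ y] ≠ [] by simp)
      rw [List.cons_append, hz, PySem.Chars.join_cons_cons, ← hz,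
          List.cons_append, hw, PySem.Chars.join_cons_cons, ← hw]
      simp only [List.append_assoc, ih]

lemma join_snoc_nil : ∀ (b : List Char) (buf : List (List Char)),
    PySem.Chars.join [','] ((b :: buf) ++ [[]]) = PySem.Chars.join [','] (b :: buf) ++ [','] := by
  intro b buf
  induction buf generalizing b with
  | nil => simp [PySem.Chars.join_cons_cons, PySem.Chars.join_singleton]
  | cons b2 rest ih =>
      have h1 : (b :: b2 :: rest) ++ [([] : List Char)] = b :: b2 :: (rest ++ [[]]) := by simp
      have h2 : b2 :: (rest ++ [([] : List Char)]) = (b2 :: rest) ++ [[]] := by simp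
      rw [h1, PySem.Chars.join_cons_cons, h2, ih b2, PySem.Chars.join_cons_cons]
      simp

lemma main_lemma : ∀ (pieces : List (List Char)), pieces ≠ [] → (∀ pc ∈ pieces, ',' ∉ pc) →
    ∀ (cols : List (List Char)) (buf : List (List Char)) (p : Int) (q : Bool),
    pvFinA ((PySem.Chars.join [','] pieces).foldl pvStepA
        (cols, PySem.Chars.join [','] (buf ++ [[]]), p, q))
      = pvFinB (pieces.foldl pvStepB (cols, buf, p, q)) := by
  intro pieces
  induction pieces with
  | nil => intro h; exact absurd rfl h
  | cons pc rest ih =>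
      intro _ hcf cols buf p q
      have hpc : ',' ∉ pc := hcf pc (by simp)
      cases rest with
      | nil =>
          rw [PySem.Chars.join_singleton]
          rw [foldA_piece pc hpc, join_snoc]
          simp only [List.nil_append]
          rcases hpq : pc.foldl pvScanB (p, q) with ⟨p', q'⟩
          simp only [List.foldl_cons, List.foldl_nil, pvStepB, hpq]
          by_cases hb : p' = 0 ∧ q' = false
          · simp only [if_pos hb, pvFinA, pvFinB, PySem.Chars.join_nil]
            simp [PySem.Chars.strip, PySem.Chars.lstrip, PySem.Chars.rstrip]
          · simp only [if_neg hb, pvFinA, pvFinB]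
      | cons r rs =>
          rw [PySem.Chars.join_cons_cons]
          rw [List.append_assoc, List.foldl_append, foldA_piece pc hpc, join_snoc]
          simp only [List.nil_append]
          rcases hpq : pc.foldl pvScanB (p, q) with ⟨p', q'⟩
          rw [List.cons_append, List.nil_append, List.foldl_cons, stepA_comma]
          have hrest : ∀ pc' ∈ (r :: rs), ',' ∉ pc' := fun pc' h => hcf pc' (by simp [h])
          by_cases hb : p' = 0 ∧ q' = false
          · rw [if_pos hb]
            have hIH := ih (by simp) hrest
              (if PySem.Chars.strip (PySem.Chars.join [','] (buf ++ [pc])) ≠ [] then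
                cols ++ [PySem.Chars.strip (PySem.Chars.join [','] (buf ++ [pc]))] else cols)
              [] p' q'
            simp only [List.nil_append, PySem.Chars.join_singleton] at hIH
            rw [hIH]
            simp only [List.foldl_cons, pvStepB, hpq, if_pos hb]
          · rw [if_neg hb]
            have h1 : PySem.Chars.join [','] (buf ++ [pc]) ++ [','] =
                PySem.Chars.join [','] ((buf ++ [pc]) ++ [[]]) := by
              obtain ⟨z, zs, hz⟩ := List.exists_cons_of_ne_nil (show buf ++ [pc] ≠ [] by simp)
              rw [hz, join_snoc_nil]
            rw [h1, ih (by simp) hrest]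
            simp only [List.foldl_cons, pvStepB, hpq, if_neg hb]

-- strip is idempotent
lemma dropWhile_idem {α : Type} (p : α → Bool) : ∀ (l : List α),
    List.dropWhile p (List.dropWhile p l) = List.dropWhile p l := by
  intro l
  induction l with
  | nil => simp
  | cons c rest ih =>
      by_cases hc : p c
      · simp [List.dropWhile_cons, hc, ih]
      · simp [List.dropWhile_cons, hc]

lemma lstrip_rstrip_lstrip (s : List Char) :
    PySem.Chars.lstrip (PySem.Chars.rstrip (PySem.Chars.lstrip s)) =
      PySem.Chars.rstrip (PySem.Chars.lstrip s) := by
  simp only [PySem.Chars.lstrip, PySem.Chars.rstrip]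
  set t := List.dropWhile PySem.Chars.isspace s with ht
  have htd : List.dropWhile PySem.Chars.isspace t = t := by rw [ht]; exact dropWhile_idem _ s
  have hpre : (List.dropWhile PySem.Chars.isspace t.reverse).reverse <+: t :=
    List.reverse_suffix.mp
      (by simpa using List.dropWhile_suffix (l := t.reverse) PySem.Chars.isspace)
  rcases hr : (List.dropWhile PySem.Chars.isspace t.reverse).reverse with _ | ⟨x, xs⟩
  · simp
  · rw [hr] at hpre
    obtain ⟨u, hu⟩ := hpre
    have hx : PySem.Chars.isspace x = false := by
      by_contra hxx
      rw [Bool.not_eq_false] at hxx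
      rw [← hu, List.cons_append, List.dropWhile_cons, hxx] at htd
      simp at htd
      have hlen : (List.dropWhile PySem.Chars.isspace (xs ++ u)).length
          = (x :: (xs ++ u)).length := by rw [htd]
      have hle := List.length_dropWhile_le PySem.Chars.isspace (xs ++ u)
      simp only [List.length_cons] at hlen
      omega
    rw [List.dropWhile_cons, hx]
    simp

lemma strip_idem (s : List Char) :
    PySem.Chars.strip (PySem.Chars.strip s) = PySem.Chars.strip s := by
  simp only [PySem.Chars.strip]
  rw [lstrip_rstrip_lstrip]
  simp only [PySem.Chars.rstrip]
  rw [List.reverse_reverse, dropWhile_idem]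

-- every element the B fold emits is an already-stripped nonempty string
def pvGood (c : List Char) : Prop := PySem.Chars.strip c = c ∧ c ≠ []

lemma foldB_inv : ∀ (pieces : List (List Char)) (cols buf : List (List Char)) (p : Int) (q : Bool),
    (∀ c ∈ cols, pvGood c) →
    ∀ c ∈ (pieces.foldl pvStepB (cols, buf, p, q)).1, pvGood c := by
  intro pieces
  induction pieces with
  | nil => intro cols buf p q h; simpa using h
  | cons pc rest ih =>
      intro cols buf p q h
      simp only [List.foldl_cons, pvStepB]
      rcases hpq : pc.foldl pvScanB (p, q) with ⟨p', q'⟩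
      by_cases hb : p' = 0 ∧ q' = false
      · simp only [if_pos hb]
        split_ifs with hcol
        · exact ih _ _ _ _ (by
            intro c hc
            rcases List.mem_append.mp hc with h' | h'
            · exact h c h'
            · simp at h'
              subst h'
              exact ⟨strip_idem _, hcol⟩)
        · exact ih _ _ _ _ h
      · simp only [if_neg hb]
        exact ih _ _ _ _ h

lemma finB_good (st : List (List Char) × List (List Char) × Int × Bool)
    (h : ∀ c ∈ st.1, pvGood c) : ∀ c ∈ pvFinB st, pvGood c := by
  simp only [pvFinB]
  split_ifs with hr
  · intro c hc
    rcases List.mem_append.mp hc with h' | h'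
    · exact h c h'
    · simp at h'
      subst h'
      exact ⟨strip_idem _, hr⟩
  · exact h

lemma filter_good (cols : List (List Char)) (h : ∀ c ∈ cols, pvGood c) :
    cols.filter (fun col => decide (PySem.Chars.strip col ≠ [])) = cols := by
  apply List.filter_eq_self.mpr
  intro c hc
  rcases h c hc with ⟨h1, h2⟩
  simp [h1, h2]

-- ===== VERDICT (by name: the statement is the Claim_ definition above) =====
theorem split_and_clean_columns_py_spec : Claim_equal_split_and_clean_columns_py := by
  unfold Claim_equal_split_and_clean_columns_py
  intro columns_str _
  unfold Spec_split_and_clean_columns_py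
  unfold split_and_clean_columns_py split_and_clean_columns_py_alt
  by_cases hg : columns_str = "" ∨ PySem.Str.strip columns_str = ""
  · rw [if_pos hg, if_pos hg]
  · rw [if_neg hg, if_neg hg]
    show ((pvFinA (columns_str.toList.foldl pvStepA ([], [], 0, false))).filter
          (fun col => decide (PySem.Chars.strip col ≠ []))).map String.ofList
        = (pvFinB ((PySem.Chars.splitOn columns_str.toList [',']).foldl pvStepB
            ([], [], 0, false))).map String.ofList
    generalize columns_str.toList = cs
    rw [splitOn_eq]
    have hmain := main_lemma (pySplitC [] cs) (pySplitC_ne_nil cs [])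
      (comma_free cs [] (by simp)) [] [] 0 false
    rw [join_pySplitC cs []] at hmain
    simp only [List.nil_append, PySem.Chars.join_singleton] at hmain
    rw [hmain, filter_good _ (finB_good _ (foldB_inv (pySplitC [] cs) [] [] 0 false (by simp)))]
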